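-- pv_equiv track=rewrite | github.com/gtuck/web1430-Course-Docs | scripts/grade_ch10_codepen.py | check_counts_minmax
-- ===== SOURCE A (Python) =====
-- from typing import Any, Dict, List, Optional, Tuple
--
-- def check_counts_minmax(lines: List[str]) -> Tuple[int, int, str]:
--     count = any(l.startswith('Count:') for l in lines)
--     earliest = any(l.startswith('Earliest:') for l in lines)
--     latest = any(l.startswith('Latest:') for l in lines)
--     highest = any(l.startswith('Highest rated:') for l in lines)
--     lowest = any(l.startswith('Lowest rated:') for l in lines)
--     found = sum([count, earliest, latest, highest, lowest])
--     score = 8 if found >= 5 else (5 if found >= 3 else 0)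
--     return score, 8, f"found={found}"
-- ===== SOURCE B (Python) =====
-- PREFIXES = ('Count:', 'Earliest:', 'Latest:', 'Highest rated:', 'Lowest rated:')
--
-- def check_counts_minmax(lines):
--     seen = set()
--     for l in lines:
--         for p in PREFIXES:
--             if l.startswith(p):
--                 seen.add(p)
--     found = len(seen)
--     score = 8 if found >= 5 else (5 if found >= 3 else 0)
--     return score, 8, f"found={found}"
-- ===== Notes on version B (the rewrite author's own statement) =====
-- stated objective: simpler
-- what changed: Replaces A's five separate any-scans over the lines (one per label) by a single pass that maintains one set of matched prefixes, whose size is the found count.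
import Mathlib
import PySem

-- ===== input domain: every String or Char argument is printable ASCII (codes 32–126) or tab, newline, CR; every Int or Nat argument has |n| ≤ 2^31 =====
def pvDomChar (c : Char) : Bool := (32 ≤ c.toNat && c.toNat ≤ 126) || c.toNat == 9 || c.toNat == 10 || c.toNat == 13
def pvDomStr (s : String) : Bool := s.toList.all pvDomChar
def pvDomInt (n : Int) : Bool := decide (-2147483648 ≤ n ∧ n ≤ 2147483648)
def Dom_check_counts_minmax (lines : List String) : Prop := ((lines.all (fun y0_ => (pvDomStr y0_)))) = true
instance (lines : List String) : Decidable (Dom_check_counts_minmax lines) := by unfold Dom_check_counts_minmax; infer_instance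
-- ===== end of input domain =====

-- B replaces A's five separate any-scans by one pass over the lines maintaining a set of matched prefixes (simpler; return value only, no side effects).

-- ===== PORT A =====
def check_counts_minmax (lines : List String) : Int × Int × String :=
  let count := lines.any (fun l => PySem.Str.startswith l "Count:")
  let earliest := lines.any (fun l => PySem.Str.startswith l "Earliest:")
  let latest := lines.any (fun l => PySem.Str.startswith l "Latest:")
  let highest := lines.any (fun l => PySem.Str.startswith l "Highest rated:")
  let lowest := lines.any (fun l => PySem.Str.startswith l "Lowest rated:")
  let found : Int := [(if count then (1:Int) else 0), (if earliest then (1:Int) else 0),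
    (if latest then (1:Int) else 0), (if highest then (1:Int) else 0),
    (if lowest then (1:Int) else 0)].sum
  let score : Int := if found ≥ 5 then 8 else (if found ≥ 3 then 5 else 0)
  (score, 8, "found=" ++ PySem.Int.toStr found)

-- ===== PORT B =====
def pvPrefixes : List String := ["Count:", "Earliest:", "Latest:", "Highest rated:", "Lowest rated:"]

def check_counts_minmax_alt (lines : List String) : Int × Int × String :=
  let seen : PySem.Set String :=
    lines.foldl (fun s l =>
      pvPrefixes.foldl (fun s p => if PySem.Str.startswith l p then PySem.Set.add s p else s) s)
      PySem.Set.empty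
  let found : Int := (PySem.Set.len seen : Int)
  let score : Int := if found ≥ 5 then 8 else (if found ≥ 3 then 5 else 0)
  (score, 8, "found=" ++ PySem.Int.toStr found)

-- ===== PRECONDITION & SPEC =====
def Spec_check_counts_minmax (lines : List String) (out : Int × Int × String) : Prop := out = check_counts_minmax_alt lines
instance (lines : List String) (out : Int × Int × String) : Decidable (Spec_check_counts_minmax lines out) := by unfold Spec_check_counts_minmax; infer_instance

-- ===== CLAIM (what is proved, stated in full; the proofs are below) =====
def Claim_equal_check_counts_minmax : Prop := ∀ (lines : List String), Dom_check_counts_minmax lines → Spec_check_counts_minmax lines (check_counts_minmax lines)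

-- ===== LEMMAS AND PROOFS =====

-- membership and nodup facts for B's conditional-add loops
theorem pv_mem_addIf (c : String → Bool) (P : List String) (s : PySem.Set String) (y : String) :
    y ∈ P.foldl (fun s p => if c p then PySem.Set.add s p else s) s ↔
      y ∈ s ∨ (y ∈ P ∧ c y = true) := by
  induction P generalizing s with
  | nil => simp
  | cons p P ih =>
    rw [List.foldl_cons, ih]
    by_cases hy : y = p
    · subst hy
      cases h : c y
      · simp only [h, Bool.false_eq_true, if_false, List.mem_cons]
        tauto
      · simp only [h, if_true, PySem.Set.mem_add, List.mem_cons]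
        tauto
    · cases h : c p
      · simp only [h, Bool.false_eq_true, if_false, List.mem_cons]
        tauto
      · simp only [h, if_true, PySem.Set.mem_add, List.mem_cons]
        tauto

theorem pv_nodup_addIf (c : String → Bool) (P : List String) (s : PySem.Set String) (h : s.Nodup) :
    (P.foldl (fun s p => if c p then PySem.Set.add s p else s) s).Nodup := by
  induction P generalizing s with
  | nil => exact h
  | cons p P ih =>
    rw [List.foldl_cons]
    split_ifs
    · exact ih _ (PySem.Set.nodup_add _ _ h)
    · exact ih _ h

theorem pv_mem_seen (lines : List String) (s : PySem.Set String) (y : String) :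
    y ∈ lines.foldl (fun s l =>
        pvPrefixes.foldl (fun s p => if PySem.Str.startswith l p then PySem.Set.add s p else s) s) s ↔
      y ∈ s ∨ (y ∈ pvPrefixes ∧ lines.any (fun l => PySem.Str.startswith l y) = true) := by
  induction lines generalizing s with
  | nil => simp
  | cons a t ih =>
    rw [List.foldl_cons, ih, pv_mem_addIf]
    simp only [List.any_cons, Bool.or_eq_true]
    tauto

theorem pv_nodup_seen (lines : List String) (s : PySem.Set String) (h : s.Nodup) :
    (lines.foldl (fun s l =>
        pvPrefixes.foldl (fun s p => if PySem.Str.startswith l p then PySem.Set.add s p else s) s) s).Nodup := by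
  induction lines generalizing s with
  | nil => exact h
  | cons a t ih => exact ih _ (pv_nodup_addIf _ _ _ h)

-- the size of B's set equals the number of labels some line carries
theorem pv_len_seen (lines : List String) :
    (lines.foldl (fun s l =>
        pvPrefixes.foldl (fun s p => if PySem.Str.startswith l p then PySem.Set.add s p else s) s)
      PySem.Set.empty).length =
      (pvPrefixes.filter (fun p => lines.any (fun l => PySem.Str.startswith l p))).length := by
  apply List.Perm.length_eq
  rw [List.perm_ext_iff_of_nodup (pv_nodup_seen _ _ (by simp [PySem.Set.empty]))
      (List.Nodup.filter _ (by decide))]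
  intro y
  rw [pv_mem_seen, List.mem_filter]
  simp [PySem.Set.empty]

-- ===== VERDICT (by name: the statement is the Claim_ definition above) =====
theorem check_counts_minmax_spec : Claim_equal_check_counts_minmax := by
  intro lines _
  unfold Spec_check_counts_minmax check_counts_minmax check_counts_minmax_alt
  simp only [PySem.Set.len]
  simp only [pv_len_seen]
  cases h1 : lines.any (fun l => PySem.Str.startswith l "Count:") <;>
  cases h2 : lines.any (fun l => PySem.Str.startswith l "Earliest:") <;>
  cases h3 : lines.any (fun l => PySem.Str.startswith l "Latest:") <;>
  cases h4 : lines.any (fun l => PySem.Str.startswith l "Highest rated:") <;>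
  cases h5 : lines.any (fun l => PySem.Str.startswith l "Lowest rated:") <;>
    simp only [h1, h2, h3, h4, h5, pvPrefixes, List.filter_cons, List.filter_nil,
      if_true, List.length_cons, List.length_nil, List.sum_cons, List.sum_nil] <;> norm_num
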